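-- pv_equiv track=rewrite | github.com/Guille94899/TFG | entrenamiento/entreno_EMO_BIO.py | insert_tags
-- ===== SOURCE A (Python) =====
-- def insert_tags(words, labs):
--     out = []
--     i = 0
--     while i < len(words):
--         lab = labs[i]
--         out.append(words[i])
--
--         if lab.startswith("B-"):
--             tag = lab[2:]
--             j = i + 1
--             while j < len(words) and labs[j] == f"I-{tag}":
--                 out.append(words[j])
--                 j += 1
--             out.append(f"<<{tag}>>")
--             i = j
--         else:
--             i += 1
--
--     return " ".join(out)
-- ===== SOURCE B (Python) =====
-- def insert_tags(words, labs):
--     out = []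
--     open_tag = None
--     for w, lab in zip(words, labs):
--         if open_tag is not None and lab != "I-" + open_tag:
--             out.append("<<" + open_tag + ">>")
--             open_tag = None
--         out.append(w)
--         if open_tag is None and lab.startswith("B-"):
--             open_tag = lab[2:]
--     if open_tag is not None:
--         out.append("<<" + open_tag + ">>")
--     return " ".join(out)
-- ===== Notes on version B (the rewrite author's own statement) =====
-- stated objective: alternative
-- what changed: Replaced A's nested consume-and-jump while loops over indices by a single flat pass over zip(words, labs) that keeps an 'open span' state and emits the closing <<tag>> marker lazily when the span ends (or after the loop).
import Mathlib
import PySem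

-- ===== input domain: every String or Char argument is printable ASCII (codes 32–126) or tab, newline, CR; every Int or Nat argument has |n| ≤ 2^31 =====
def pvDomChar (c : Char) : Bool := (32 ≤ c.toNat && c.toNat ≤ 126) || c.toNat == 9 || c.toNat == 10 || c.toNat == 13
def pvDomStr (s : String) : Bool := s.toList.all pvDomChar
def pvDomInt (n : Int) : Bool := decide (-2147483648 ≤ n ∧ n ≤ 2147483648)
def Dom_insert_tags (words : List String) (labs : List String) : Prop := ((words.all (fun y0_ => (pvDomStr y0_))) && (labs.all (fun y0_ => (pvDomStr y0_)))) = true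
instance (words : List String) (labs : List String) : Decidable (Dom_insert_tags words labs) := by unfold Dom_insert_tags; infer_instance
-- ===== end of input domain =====

-- B replaces A's nested consume-and-jump index loops by one flat pass over the zipped
-- lists with an 'open span' state and deferred emission of the closing marker (objective: alternative).

-- ===== PORT A =====
-- inner while loop of A: consumes the run of labels equal to "I-"+tag starting at j,
-- returning the final j and the consumed words (A's appends to out).
def aInner (words labs : List String) (tag : String) (j : Nat) : Nat × List String :=
  if h : j < words.length ∧ labs.getD j "" = "I-" ++ tag then
    let r := aInner words labs tag (j + 1)
    (r.1, words.getD j "" :: r.2)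
  else
    (j, [])
termination_by words.length - j
decreasing_by omega

theorem aInner_fst_ge (words labs : List String) (tag : String) :
    ∀ n j, words.length - j = n → j ≤ (aInner words labs tag j).1 := by
  intro n
  induction n using Nat.strong_induction_on with
  | _ n ih =>
    intro j hn
    rw [aInner]
    split
    next h =>
      have := ih (words.length - (j + 1)) (by omega) (j + 1) rfl
      dsimp only
      omega
    next h => exact Nat.le_refl j

-- outer while loop of A
def aOuter (words labs : List String) (i : Nat) : List String :=
  if h : i < words.length then
    let lab := labs.getD i ""
    let w := words.getD i ""
    if PySem.Str.startswith lab "B-" then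
      let tag := PySem.Str.slice lab (some 2) none
      let r := aInner words labs tag (i + 1)
      w :: (r.2 ++ ("<<" ++ tag ++ ">>") :: aOuter words labs r.1)
    else
      w :: aOuter words labs (i + 1)
  else []
termination_by words.length - i
decreasing_by
  · have := aInner_fst_ge words labs (PySem.Str.slice (labs.getD i "") (some 2) none)
      (words.length - (i + 1)) (i + 1) rfl
    omega
  · omega

def insert_tags (words : List String) (labs : List String) : String :=
  PySem.Str.join " " (aOuter words labs 0)

-- ===== PORT B =====
-- Source B's for-loop over zip(words, labs) with state (out, open_tag), written as
-- structural recursion returning the suffix of out produced from this point on.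
def bLoop (openTag : Option String) (xs : List (String × String)) : List String :=
  match xs with
  | [] =>
    match openTag with
    | some t => ["<<" ++ t ++ ">>"]
    | none => []
  | (w, lab) :: rest =>
    match openTag with
    | some t =>
      if lab = "I-" ++ t then
        w :: bLoop (some t) rest
      else
        ("<<" ++ t ++ ">>") :: w ::
          (if PySem.Str.startswith lab "B-" then
             bLoop (some (PySem.Str.slice lab (some 2) none)) rest
           else bLoop none rest)
    | none =>
      w ::
        (if PySem.Str.startswith lab "B-" then
           bLoop (some (PySem.Str.slice lab (some 2) none)) rest
         else bLoop none rest)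

def insert_tags_alt (words : List String) (labs : List String) : String :=
  PySem.Str.join " " (bLoop none (words.zip labs))

-- ===== PRECONDITION & SPEC =====
-- A indexes labs[i] for every i < len(words), so it raises IndexError exactly when
-- labs is shorter than words; Pre_ excludes exactly those inputs.
def Pre_insert_tags (words : List String) (labs : List String) : Prop :=
  words.length ≤ labs.length
instance (words : List String) (labs : List String) : Decidable (Pre_insert_tags words labs) := by
  unfold Pre_insert_tags; infer_instance

def pvWitness_insert_tags : List String × List String := (["a", "b"], ["B-PER", "O"])

def Spec_insert_tags (words : List String) (labs : List String) (out : String) : Prop := out = insert_tags_alt words labs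
instance (words : List String) (labs : List String) (out : String) : Decidable (Spec_insert_tags words labs out) := by unfold Spec_insert_tags; infer_instance

-- ===== CLAIM (what is proved, stated in full; the proofs are below) =====
def Claim_equal_insert_tags : Prop := ∀ (words : List String) (labs : List String), Dom_insert_tags words labs → Pre_insert_tags words labs → Spec_insert_tags words labs (insert_tags words labs)

-- ===== LEMMAS AND PROOFS =====

theorem zip_drop_cons (words labs : List String) (i : Nat)
    (hi : i < words.length) (hle : words.length ≤ labs.length) :
    (words.drop i).zip (labs.drop i)
      = (words.getD i "", labs.getD i "") :: (words.drop (i + 1)).zip (labs.drop (i + 1)) := by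
  have hi' : i < labs.length := lt_of_lt_of_le hi hle
  have h1 : words.getD i "" = words[i] := by
    simp [List.getD_eq_getElem?_getD, hi]
  have h2 : labs.getD i "" = labs[i] := by
    simp [List.getD_eq_getElem?_getD, hi']
  rw [List.drop_eq_getElem_cons hi, List.drop_eq_getElem_cons hi', List.zip_cons_cons, h1, h2]

theorem zip_drop_nil (words labs : List String) (i : Nat) (hi : words.length ≤ i) :
    (words.drop i).zip (labs.drop i) = [] := by
  rw [List.drop_eq_nil_of_le hi]; simp

-- joint invariant: A's outer loop from i matches bLoop with no open span, and
-- A's inner run from i followed by the close marker and the outer loop matches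
-- bLoop with span t open.
theorem main_inv (words labs : List String) (hle : words.length ≤ labs.length) :
    ∀ n i, words.length - i = n →
      (aOuter words labs i = bLoop none ((words.drop i).zip (labs.drop i)) ∧
       ∀ t, (aInner words labs t i).2
              ++ ("<<" ++ t ++ ">>") :: aOuter words labs (aInner words labs t i).1
            = bLoop (some t) ((words.drop i).zip (labs.drop i))) := by
  intro n
  induction n using Nat.strong_induction_on with
  | _ n ih =>
    intro i hn
    by_cases hi : i < words.length
    case neg =>
      have hge : words.length ≤ i := le_of_not_gt hi
      rw [zip_drop_nil words labs i hge]
      constructor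
      · rw [aOuter]; simp [hi, bLoop]
      · intro t
        rw [aInner]
        have hc : ¬ (i < words.length ∧ labs.getD i "" = "I-" ++ t) := by
          intro hx; exact hi hx.1
        rw [dif_neg hc]
        rw [aOuter]
        simp [hi, bLoop]
    case pos =>
      have hz := zip_drop_cons words labs i hi hle
      have hn' : words.length - (i + 1) = n - 1 := by omega
      have hlt : n - 1 < n := by omega
      have IH := ih (n - 1) hlt (i + 1) hn'
      constructor
      · -- outer loop step
        rw [aOuter, dif_pos hi, hz]
        simp only [bLoop]
        by_cases hb : PySem.Str.startswith (labs.getD i "") "B-" = true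
        · rw [if_pos hb, if_pos hb, ← IH.2 (PySem.Str.slice (labs.getD i "") (some 2) none)]
        · rw [if_neg hb, if_neg hb, IH.1]
      · -- inner loop step
        intro t
        rw [hz, aInner]
        simp only [bLoop]
        by_cases hIt : labs.getD i "" = "I-" ++ t
        · have hc : i < words.length ∧ labs.getD i "" = "I-" ++ t := ⟨hi, hIt⟩
          rw [dif_pos hc, if_pos hIt, ← IH.2 t]
          simp
        · have hc : ¬ (i < words.length ∧ labs.getD i "" = "I-" ++ t) := by
            intro hx; exact hIt hx.2
          rw [dif_neg hc, if_neg hIt]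
          -- LHS: [] ++ close :: aOuter i; unfold aOuter once at index i
          rw [List.nil_append, aOuter, dif_pos hi]
          by_cases hb : PySem.Str.startswith (labs.getD i "") "B-" = true
          · rw [if_pos hb, if_pos hb, ← IH.2 (PySem.Str.slice (labs.getD i "") (some 2) none)]
          · rw [if_neg hb, if_neg hb, IH.1]

-- ===== VERDICT (by name: the statement is the Claim_ definition above) =====
theorem insert_tags_spec : Claim_equal_insert_tags := by
  intro words labs _ hpre
  unfold Spec_insert_tags insert_tags insert_tags_alt
  have h := (main_inv words labs hpre (words.length - 0) 0 rfl).1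
  simpa using congrArg (PySem.Str.join " ") h
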